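-- pv_equiv track=rewrite | github.com/andrey-yemelyanov/competitive-programming | cp-book/ch2/nonlineards/map/_417_WordIndex.py | generate_word_encodings
-- ===== SOURCE A (Python) =====
-- def generate_word_encodings(max_word_len):
-- 	code = 1
-- 	encoding = dict()
-- 	for word_len in range(max_word_len):
-- 		for word in generate_words(word_len + 1):
-- 			encoding[word] = code
-- 			code += 1
-- 	return encoding
--
-- alphabet = "abcdefghijklmnopqrstuvwxyz"
--
-- def generate_words_rec(word_len, word, words):
-- 	if word_len == 0:
-- 		words.append(word)
-- 		return
-- 	for c in alphabet:
-- 		if len(word) == 0 or c > word[-1]: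
-- 			generate_words_rec(word_len - 1, word + c, words)
--
-- def generate_words(word_len):
-- 	words = []
-- 	generate_words_rec(word_len, "", words)
-- 	return words
-- ===== SOURCE B (Python) =====
-- from itertools import combinations
--
-- alphabet = "abcdefghijklmnopqrstuvwxyz"
--
-- def generate_word_encodings(max_word_len):
--     encoding = {}
--     code = 1
--     for word_len in range(max_word_len):
--         for combo in combinations(alphabet, word_len + 1):
--             encoding[''.join(combo)] = code
--             code += 1
--     return encoding
-- ===== Notes on version B (the rewrite author's own statement) =====
-- stated objective: idiomatic
-- what changed: Replaces the hand-written recursive backtracking helper (which scans all 26 letters at every node and filters by the last letter) with a direct enumeration of strictly increasing words via itertools.combinations over the alphabet, which yields the same words in the same lexicographic order.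
import Mathlib
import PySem

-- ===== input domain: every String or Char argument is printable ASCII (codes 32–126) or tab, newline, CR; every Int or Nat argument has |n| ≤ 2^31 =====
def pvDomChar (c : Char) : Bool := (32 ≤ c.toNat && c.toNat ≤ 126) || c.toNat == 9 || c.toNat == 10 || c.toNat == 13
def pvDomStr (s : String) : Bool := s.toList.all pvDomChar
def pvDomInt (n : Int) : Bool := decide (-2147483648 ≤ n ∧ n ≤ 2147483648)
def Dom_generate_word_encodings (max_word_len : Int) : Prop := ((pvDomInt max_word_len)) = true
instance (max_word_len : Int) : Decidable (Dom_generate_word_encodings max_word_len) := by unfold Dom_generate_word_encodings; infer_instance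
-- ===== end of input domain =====

-- B replaces A's recursive backtracking word generator with a direct enumeration of
-- k-combinations of the alphabet (itertools.combinations), same words in the same order (idiomatic).

-- ===== PORT A =====

-- alphabet = "abcdefghijklmnopqrstuvwxyz"  (words are handled as List Char; String.ofList at dict insertion)
def alphabetL : List Char := "abcdefghijklmnopqrstuvwxyz".toList

-- the guard `len(word) == 0 or c > word[-1]`
def wrGuard (w : List Char) (c : Char) : Bool :=
  w.isEmpty || (w.getLast?.elim false (fun d => decide (d < c)))

-- generate_words_rec(word_len, word, words): words.append is modelled by threading the list
def generate_words_rec : Nat → List Char → List (List Char) → List (List Char)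
  | 0, word, words => words ++ [word]
  | (k+1), word, words =>
      alphabetL.foldl
        (fun ws c => if wrGuard word c then generate_words_rec k (word ++ [c]) ws else ws)
        words

def generate_words (word_len : Nat) : List (List Char) :=
  generate_words_rec word_len [] []

-- for word_len in range(max_word_len): for word in generate_words(word_len + 1): encoding[word] = code; code += 1
-- (range(n) is empty for n ≤ 0, hence .toNat; the recursion depth word_len+1 is a nonnegative int, hence Nat)
def generate_word_encodings (max_word_len : Int) : List (String × Int) :=
  ((List.range max_word_len.toNat).foldl
      (fun (st : PySem.Dict String Int × Int) i =>
        (generate_words (i + 1)).foldl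
          (fun st w => (st.1.insert (String.ofList w) st.2, st.2 + 1)) st)
      (PySem.Dict.empty, 1)).1.items

-- ===== PORT B =====

-- itertools.combinations(alphabet, k), ported as the standard combinations function
-- (emits the k-element increasing selections in lexicographic order, as combinations does)
def combosB : Nat → List Char → List (List Char)
  | 0, _ => [[]]
  | _+1, [] => []
  | (k+1), c :: cs => (combosB k cs).map (fun t => c :: t) ++ combosB (k+1) cs

def generate_word_encodings_alt (max_word_len : Int) : List (String × Int) :=
  ((List.range max_word_len.toNat).foldl
      (fun (st : PySem.Dict String Int × Int) i =>
        (combosB (i + 1) alphabetL).foldl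
          (fun st w => (st.1.insert (String.ofList w) st.2, st.2 + 1)) st)
      (PySem.Dict.empty, 1)).1.items

-- ===== PRECONDITION & SPEC =====
def Spec_generate_word_encodings (max_word_len : Int) (out : List (String × Int)) : Prop := out = generate_word_encodings_alt max_word_len
instance (max_word_len : Int) (out : List (String × Int)) : Decidable (Spec_generate_word_encodings max_word_len out) := by unfold Spec_generate_word_encodings; infer_instance

-- ===== CLAIM (what is proved, stated in full; the proofs are below) =====
def Claim_equal_generate_word_encodings : Prop := ∀ (max_word_len : Int), Dom_generate_word_encodings max_word_len → Spec_generate_word_encodings max_word_len (generate_word_encodings max_word_len)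

-- ===== LEMMAS AND PROOFS =====

-- a guarded foldl is a foldl over the filtered list
lemma foldl_guard {α β : Type} (f : α → β → α) (p : β → Bool) :
    ∀ (l : List β) (a : α),
      l.foldl (fun a b => if p b then f a b else a) a = (l.filter p).foldl f a := by
  intro l
  induction l with
  | nil => intro a; rfl
  | cons b l ih =>
      intro a
      by_cases h : p b = true <;> simp [h, ih]

lemma wrGuard_append (w : List Char) (c a : Char) :
    wrGuard (w ++ [c]) a = decide (c < a) := by
  simp [wrGuard]

lemma alphabetL_sorted : alphabetL.Pairwise (· < ·) := by decide

-- the fold over a sorted candidate list matches combinations of that list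
lemma combos_fold (k : Nat)
    (IH : ∀ (w : List Char) (ws : List (List Char)),
      generate_words_rec k w ws
        = ws ++ (combosB k (alphabetL.filter (wrGuard w))).map (fun t => w ++ t)) :
    ∀ (cs : List Char), cs.Pairwise (· < ·) →
      (∀ c ∈ cs, alphabetL.filter (fun a => decide (c < a)) = cs.filter (fun a => decide (c < a))) →
      ∀ (w : List Char) (ws : List (List Char)),
        cs.foldl (fun ws c => generate_words_rec k (w ++ [c]) ws) ws
          = ws ++ (combosB (k+1) cs).map (fun t => w ++ t) := by
  intro cs
  induction cs with
  | nil => intro _ _ w ws; simp [combosB]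
  | cons c cs' ihcs =>
      intro hsort hfilt w ws
      have hcs' : alphabetL.filter (fun a => decide (c < a)) = cs' := by
        have h1 := hfilt c (List.mem_cons_self ..)
        have h2 : cs'.filter (fun a => decide (c < a)) = cs' := by
          apply List.filter_eq_self.mpr
          intro a ha
          exact decide_eq_true ((List.pairwise_cons.mp hsort).1 a ha)
        rw [h1, List.filter_cons]
        simp [h2]
      have hstep : generate_words_rec k (w ++ [c]) ws
          = ws ++ (combosB k cs').map (fun t => (w ++ [c]) ++ t) := by
        have hfg : alphabetL.filter (wrGuard (w ++ [c]))
            = alphabetL.filter (fun a => decide (c < a)) :=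
          List.filter_congr (fun a _ => wrGuard_append w c a)
        rw [IH, hfg, hcs']
      have hsort' : cs'.Pairwise (· < ·) := (List.pairwise_cons.mp hsort).2
      have hfilt' : ∀ d ∈ cs', alphabetL.filter (fun a => decide (d < a)) = cs'.filter (fun a => decide (d < a)) := by
        intro d hd
        have := hfilt d (List.mem_cons_of_mem _ hd)
        rw [this, List.filter_cons]
        have hcd : c < d := (List.pairwise_cons.mp hsort).1 d hd
        simp [not_lt_of_gt hcd]
      have := ihcs hsort' hfilt' w (ws ++ (combosB k cs').map (fun t => (w ++ [c]) ++ t))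
      simp only [List.foldl_cons, hstep, this, combosB, List.map_append, List.map_map]
      simp [Function.comp, List.append_assoc]

-- main invariant: A's recursion produces exactly the combinations of the admissible letters
lemma main_inv : ∀ (k : Nat) (w : List Char) (ws : List (List Char)),
    generate_words_rec k w ws
      = ws ++ (combosB k (alphabetL.filter (wrGuard w))).map (fun t => w ++ t) := by
  intro k
  induction k with
  | zero => intro w ws; simp [generate_words_rec, combosB]
  | succ k ih =>
      intro w ws
      show alphabetL.foldl
          (fun ws c => if wrGuard w c then generate_words_rec k (w ++ [c]) ws else ws) ws
        = _
      rw [foldl_guard (fun ws c => generate_words_rec k (w ++ [c]) ws) (wrGuard w)]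
      apply combos_fold k ih
      · exact List.Pairwise.filter _ alphabetL_sorted
      · intro c hc
        have hcg : wrGuard w c = true := (List.mem_filter.mp hc).2
        rw [List.filter_filter]
        apply List.filter_congr
        intro a _
        by_cases hca : c < a
        · have hga : wrGuard w a = true := by
            unfold wrGuard at hcg ⊢
            cases w with
            | nil => simp
            | cons x xs =>
                simp only [List.isEmpty_cons, Bool.false_or] at hcg ⊢
                cases hlast : (x :: xs).getLast? with
                | none => simp [hlast] at hcg
                | some d =>
                    simp only [hlast, Option.elim] at hcg ⊢
                    exact decide_eq_true (lt_trans (of_decide_eq_true hcg) hca)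
          simp [hca, hga]
        · simp [hca]

lemma words_eq (k : Nat) : generate_words k = combosB k alphabetL := by
  unfold generate_words
  rw [main_inv]
  have : alphabetL.filter (wrGuard []) = alphabetL := by
    apply List.filter_eq_self.mpr
    intro a _; rfl
  simp [this]

-- ===== VERDICT (by name: the statement is the Claim_ definition above) =====
theorem generate_word_encodings_spec : Claim_equal_generate_word_encodings := by
  intro m _
  unfold Spec_generate_word_encodings generate_word_encodings generate_word_encodings_alt
  have hf : (fun (st : PySem.Dict String Int × Int) (i : Nat) =>
        (generate_words (i + 1)).foldl
          (fun st w => (st.1.insert (String.ofList w) st.2, st.2 + 1)) st)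
      = (fun (st : PySem.Dict String Int × Int) (i : Nat) =>
        (combosB (i + 1) alphabetL).foldl
          (fun st w => (st.1.insert (String.ofList w) st.2, st.2 + 1)) st) := by
    funext st i
    rw [words_eq]
  rw [hf]
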